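-- pv_equiv track=rewrite | github.com/peluche1275/Katas | ticker.py | ticker
-- ===== SOURCE A (Python) =====
-- def ticker(text, width, tick):
--
--     sum = width + len(text)
--
--     if(tick > sum):
--         tick = tick % sum
--
--     arrayToStringify = []
--     spaceEmpty = width-tick
--     spaceWrite = width-spaceEmpty
--
--     i = 0
--     while i < spaceEmpty:
--         arrayToStringify.append(' ')
--         i += 1
--
--     j = 0
--     if(tick < width):
--         while j < spaceWrite:
--             if(j < len(text)):
--                 arrayToStringify.append(text[j])
--             j += 1
--     else:
--         j = tick-width
--         while j < tick:
--             if(j < len(text)):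
--                 arrayToStringify.append(text[j])
--             j += 1
--
--     if(len(arrayToStringify) < width):
--         k = 0
--         spaceEmpty = width-len(arrayToStringify)
--         while k < spaceEmpty:
--             arrayToStringify.append(' ')
--             k += 1
--
--     return ''.join(arrayToStringify)
-- ===== SOURCE B (Python) =====
-- def ticker(text, width, tick):
--     total = width + len(text)
--     if tick > total:
--         tick = tick % total
--     buf = ' ' * width + text + ' ' * width
--     return buf[tick:tick + width]
-- ===== Notes on version B (the rewrite author's own statement) =====
-- stated objective: simpler
-- what changed: B replaces A's three index-counting while-loops (leading spaces, guarded per-character copy in two branches, trailing pad) by building one padded buffer ' '*width + text + ' '*width and returning the single slice buf[tick:tick+width]; one C-level slice instead of per-character list appends and a join.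
-- outside the precondition, e.g. on ticker('ab', 3, -2): A returns '     ', B returns ''; on ticker('ab', -1, 0): A returns '', B returns 'a'; on ticker('', 0, 1): A raises ZeroDivisionError, B raises ZeroDivisionError
import Mathlib
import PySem

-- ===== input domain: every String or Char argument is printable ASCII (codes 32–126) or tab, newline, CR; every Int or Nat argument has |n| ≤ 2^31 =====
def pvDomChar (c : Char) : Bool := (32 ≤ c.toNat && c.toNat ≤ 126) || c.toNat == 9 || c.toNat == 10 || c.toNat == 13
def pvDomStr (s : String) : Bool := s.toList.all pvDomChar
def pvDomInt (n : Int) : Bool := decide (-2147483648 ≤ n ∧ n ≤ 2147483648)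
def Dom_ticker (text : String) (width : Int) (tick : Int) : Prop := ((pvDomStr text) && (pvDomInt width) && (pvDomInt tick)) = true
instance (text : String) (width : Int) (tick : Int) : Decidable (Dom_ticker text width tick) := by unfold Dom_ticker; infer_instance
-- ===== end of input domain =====

-- B builds one padded buffer and returns a single slice of it, instead of A's three
-- index-counting while-loops; same asymptotic cost, simpler code.

-- ===== PORT A =====
def ticker (text : String) (width : Int) (tick : Int) : String :=
  let sum := width + (text.toList.length : Int)
  let tick := if tick > sum then PySem.Int.mod tick sum else tick
  let spaceEmpty := width - tick
  let spaceWrite := width - spaceEmpty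
  let arr : List Char :=
    (PySem.List.pyRange 0 spaceEmpty 1).foldl (fun a _ => a ++ [' ']) []
  let arr :=
    if tick < width then
      (PySem.List.pyRange 0 spaceWrite 1).foldl
        (fun a j => if j < (text.toList.length : Int) then a ++ [PySem.List.pyGetD text.toList j ' '] else a) arr
    else
      (PySem.List.pyRange (tick - width) tick 1).foldl
        (fun a j => if j < (text.toList.length : Int) then a ++ [PySem.List.pyGetD text.toList j ' '] else a) arr
  let arr :=
    if (arr.length : Int) < width then
      (PySem.List.pyRange 0 (width - (arr.length : Int)) 1).foldl (fun a _ => a ++ [' ']) arr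
    else arr
  String.ofList arr

-- ===== PORT B =====
def ticker_alt (text : String) (width : Int) (tick : Int) : String :=
  let total := width + (text.toList.length : Int)
  let tick := if tick > total then PySem.Int.mod tick total else tick
  let buf : List Char :=
    PySem.List.pyRepeat [' '] width ++ text.toList ++ PySem.List.pyRepeat [' '] width
  String.ofList (PySem.List.slice buf (some tick) (some (tick + width)))

-- ===== PRECONDITION & SPEC =====
-- Pre_ restricts to the task's natural domain (nonnegative width and tick; A returns an
-- over-long all-spaces string on negative tick and garbage on negative width, accidents of
-- its index arithmetic) and excludes the one crash: tick > 0 with width = 0 and empty text,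
-- where A's 'tick % sum' divides by zero.
def Pre_ticker (text : String) (width : Int) (tick : Int) : Prop :=
  0 ≤ width ∧ 0 ≤ tick ∧
    (width + (text.toList.length : Int) ≠ 0 ∨ tick ≤ width + (text.toList.length : Int))
instance (text : String) (width : Int) (tick : Int) : Decidable (Pre_ticker text width tick) := by
  unfold Pre_ticker; infer_instance
def pvWitness_ticker : String × Int × Int := ("hello", 4, 6)

def Spec_ticker (text : String) (width : Int) (tick : Int) (out : String) : Prop := out = ticker_alt text width tick
instance (text : String) (width : Int) (tick : Int) (out : String) : Decidable (Spec_ticker text width tick out) := by unfold Spec_ticker; infer_instance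

-- ===== CLAIM (what is proved, stated in full; the proofs are below) =====
def Claim_equal_ticker : Prop := ∀ (text : String) (width : Int) (tick : Int), Dom_ticker text width tick → Pre_ticker text width tick → Spec_ticker text width tick (ticker text width tick)

-- ===== LEMMAS AND PROOFS =====

lemma foldl_spaces (a b : Int) (acc : List Char) :
    (PySem.List.pyRange a b 1).foldl (fun acc _ => acc ++ [' ']) acc
      = acc ++ List.replicate (b - a).toNat ' ' := by
  rw [show (fun (acc : List Char) (_ : Int) => acc ++ [' '])
        = (fun (acc : List Char) (j : Int) => acc ++ [(fun _ => ' ') j]) from rfl,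
      PySem.List.foldl_append_singleton_eq_map]
  simp [List.map_const', PySem.List.length_pyRange_one]


lemma filter_lt_pyRange (a b c : Int) :
    (PySem.List.pyRange a b 1).filter (fun j => decide (j < c)) = PySem.List.pyRange a (min b c) 1 := by
  generalize hn : (b - a).toNat = n
  induction n generalizing a with
  | zero =>
    rw [PySem.List.pyRange_one_eq_nil (by omega), PySem.List.pyRange_one_eq_nil (by omega)]
    rfl
  | succ n ih =>
    have hab : a < b := by omega
    rw [PySem.List.pyRange_one_cons hab]
    by_cases hac : a < c
    · rw [List.filter_cons_of_pos (by simpa using hac), ih (a + 1) (by omega),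
        PySem.List.pyRange_one_cons (by omega : a < min b c)]
    · rw [List.filter_cons_of_neg (by simpa using hac),
        PySem.List.pyRange_one_eq_nil (by omega : min b c ≤ a),
        List.filter_eq_nil_iff.mpr]
      intro x hx
      have := (PySem.List.mem_pyRange_one).mp hx
      simpa using (by omega : ¬ x < c)


lemma foldl_seg (L : List Char) (a b : Int) (acc : List Char) (h0 : 0 ≤ a) :
    (PySem.List.pyRange a b 1).foldl
        (fun acc j => if j < (L.length : Int) then acc ++ [PySem.List.pyGetD L j ' '] else acc) acc
      = acc ++ (L.take (min b (L.length : Int)).toNat).drop a.toNat := by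
  rw [show (fun (acc : List Char) (j : Int) =>
        if j < (L.length : Int) then acc ++ [PySem.List.pyGetD L j ' '] else acc)
      = (fun (acc : List Char) (j : Int) =>
        if decide (j < (L.length : Int)) = true then acc ++ [PySem.List.pyGetD L j ' '] else acc) from by
        funext acc j; simp]
  rw [PySem.List.foldl_append_if, filter_lt_pyRange]
  congr 1
  set m : Int := min b (L.length : Int) with hm
  by_cases hma : m < a
  · rw [PySem.List.pyRange_one_eq_nil (by omega), List.map_nil,
      Eq.comm, List.drop_eq_nil_iff]
    have : (L.take m.toNat).length ≤ m.toNat := by simp [List.length_take]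
    omega
  · rw [not_lt] at hma
    have hmlen : m ≤ (L.length : Int) := by omega
    have hlen : ((L.take m.toNat).length : Int) = m := by
      simp [List.length_take]; omega
    have := PySem.List.map_pyGetD_pyRange (xs := L.take m.toNat) (d := ' ') (a := a) h0
    rw [← this, show PySem.List.len (L.take m.toNat) = m from by
        simp [PySem.List.len]; omega]
    apply List.map_congr_left
    intro j hj
    have hj' := (PySem.List.mem_pyRange_one).mp hj
    rw [PySem.List.pyGetD_eq_getElem L ' ' (by omega) (by omega),
        PySem.List.pyGetD_eq_getElem (L.take m.toNat) ' ' (by omega) (by rw [hlen]; omega),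
        List.getElem_take]


lemma key (L : List Char) (wn tn : Nat) (h : tn ≤ wn + L.length) :
    List.replicate (wn - tn) ' ' ++ (L.take (min tn L.length)).drop (tn - wn)
        ++ List.replicate (wn - ((wn - tn) + ((L.take (min tn L.length)).drop (tn - wn)).length)) ' '
      = ((List.replicate wn ' ' ++ L ++ List.replicate wn ' ').drop tn).take wn := by
  apply List.ext_getElem
  · simp; omega
  · intro i h1 h2
    simp only [List.getElem_append, List.getElem_take, List.getElem_drop,
      List.getElem_replicate, List.length_append, List.length_replicate,
      List.length_take, List.length_drop]
    split_ifs <;> first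
      | rfl
      | (simp_all; omega)
      | (congr 1; simp_all; omega)


def pvNorm (L : List Char) (w k : Int) : Int :=
  if k > w + (L.length : Int) then PySem.Int.mod k (w + (L.length : Int)) else k


def pvA (L : List Char) (w t : Int) : List Char :=
  let arr : List Char := (PySem.List.pyRange 0 (w - t) 1).foldl (fun a _ => a ++ [' ']) []
  let arr :=
    if t < w then
      (PySem.List.pyRange 0 (w - (w - t)) 1).foldl
        (fun a j => if j < (L.length : Int) then a ++ [PySem.List.pyGetD L j ' '] else a) arr
    else
      (PySem.List.pyRange (t - w) t 1).foldl
        (fun a j => if j < (L.length : Int) then a ++ [PySem.List.pyGetD L j ' '] else a) arr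
  if (arr.length : Int) < w then
    (PySem.List.pyRange 0 (w - (arr.length : Int)) 1).foldl (fun a _ => a ++ [' ']) arr
  else arr


lemma core (L : List Char) (w t : Int) (hw : 0 ≤ w) (ht : 0 ≤ t) (hts : t ≤ w + L.length) :
    pvA L w t
    = PySem.List.slice (PySem.List.pyRepeat [' '] w ++ L ++ PySem.List.pyRepeat [' '] w)
        (some t) (some (t + w)) := by
  unfold pvA
  lift w to ℕ using hw with wn
  lift t to ℕ using ht with tn
  have hn : tn ≤ wn + L.length := by exact_mod_cast hts
  -- right-hand side: the slice is a drop/take of the replicate-padded buffer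
  rw [PySem.List.slice_toNat _ (by omega) (by omega), PySem.List.pyRepeat_singleton]
  have hbt : ((tn : Int) + wn).toNat - (tn : Int).toNat = wn := by omega
  have hwt : ((wn : Int)).toNat = wn := by omega
  have htt : ((tn : Int)).toNat = tn := by omega
  rw [hbt, hwt, htt]
  -- left-hand side: loops to replicate / segment closed forms
  have harr1 : (PySem.List.pyRange 0 ((wn : Int) - tn) 1).foldl
      (fun (a : List Char) _ => a ++ [' ']) [] = List.replicate (wn - tn) ' ' := by
    rw [foldl_spaces]; simp
  set S : List Char := (L.take (min tn L.length)).drop (tn - wn) with hS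
  have harr2 :
      (if (tn : Int) < wn then
         (PySem.List.pyRange 0 ((wn : Int) - ((wn : Int) - tn)) 1).foldl
           (fun a j => if j < (L.length : Int) then a ++ [PySem.List.pyGetD L j ' '] else a)
           (List.replicate (wn - tn) ' ')
       else
         (PySem.List.pyRange ((tn : Int) - wn) (tn : Int) 1).foldl
           (fun a j => if j < (L.length : Int) then a ++ [PySem.List.pyGetD L j ' '] else a)
           (List.replicate (wn - tn) ' '))
      = List.replicate (wn - tn) ' ' ++ S := by
    by_cases htw : (tn : Int) < wn
    · rw [if_pos htw, foldl_seg L 0 _ _ le_rfl]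
      rw [hS, show (0:Int).toNat = 0 from rfl, show tn - wn = 0 by omega, List.drop_zero,
        List.drop_zero, show ((wn:Int) - ((wn:Int) - tn)) = (tn:Int) by ring,
        show (min (tn:Int) (L.length:Int)).toNat = min tn L.length by omega]
    · rw [if_neg htw, foldl_seg L _ _ _ (by omega)]
      rw [hS, show ((tn:Int) - wn).toNat = tn - wn by omega,
        show (min (tn:Int) (L.length:Int)).toNat = min tn L.length by omega]
  have key' := key L wn tn hn
  by_cases hfin : ((List.replicate (wn - tn) ' ' ++ S).length : Int) < wn
  · simp only [harr1, harr2, if_pos hfin]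
    rw [foldl_spaces, ← key',
      show ((wn:Int) - (((List.replicate (wn - tn) ' ' ++ S).length : Int)) - 0).toNat
          = wn - ((wn - tn) + S.length) from by simp; omega]
  · simp only [harr1, harr2, if_neg hfin]
    rw [← key']
    have : wn - ((wn - tn) + S.length) = 0 := by
      simp at hfin
      omega
    rw [this]
    simp [hS]


lemma main_eq (text : String) (width tick : Int)
    (hpre : Pre_ticker text width tick) :
    ticker text width tick = ticker_alt text width tick := by
  unfold Pre_ticker at hpre
  obtain ⟨hw, ht, hne⟩ := hpre
  have hA : ticker text width tick
      = String.ofList (pvA text.toList width (pvNorm text.toList width tick)) := rfl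
  have hB : ticker_alt text width tick
      = String.ofList (PySem.List.slice
          (PySem.List.pyRepeat [' '] width ++ text.toList ++ PySem.List.pyRepeat [' '] width)
          (some (pvNorm text.toList width tick))
          (some (pvNorm text.toList width tick + width))) := rfl
  rw [hA, hB]
  have hbounds : 0 ≤ pvNorm text.toList width tick ∧
      pvNorm text.toList width tick ≤ width + text.toList.length := by
    unfold pvNorm
    split_ifs with hgt
    · have hs0 : width + (text.toList.length : Int) ≠ 0 := by
        rcases hne with h | h
        · exact h
        · omega
      have hspos : 0 < width + (text.toList.length : Int) := by omega
      rw [PySem.Int.mod_eq_emod_of_pos hspos]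
      constructor
      · exact Int.emod_nonneg _ hs0
      · have := Int.emod_lt_of_pos tick hspos
        omega
    · omega
  exact congrArg String.ofList (core text.toList width _ hw hbounds.1 hbounds.2)


-- ===== VERDICT (by name: the statement is the Claim_ definition above) =====
theorem ticker_spec : Claim_equal_ticker := by
  intro text width tick _ hpre
  unfold Spec_ticker
  exact main_eq text width tick hpre
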